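-- pv_equiv track=rewrite | github.com/mediwind/PS_Algorithm | 백준/Platinum/27730. 견우와 직녀/견우와 직녀.py | get_min_dist_node
-- ===== SOURCE A (Python) =====
-- def get_min_dist_node(n, edges):
--     if n == 1:
--         return 1, 0
--
--     adj = [[] for _ in range(n + 1)]
--     for u, v, w in edges:
--         adj[u].append((v, w))
--         adj[v].append((u, w))
--
--     subtree_size = [0] * (n + 1)
--     subtree_dist = [0] * (n + 1)
--
--
--     def dfs1(curr, parent):
--         subtree_size[curr] = 1
--         for nxt, weight in adj[curr]:
--             if nxt != parent:
--                 dfs1(nxt, curr)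
--                 subtree_size[curr] += subtree_size[nxt]
--                 subtree_dist[curr] += subtree_dist[nxt] + subtree_size[nxt] * weight
--
--     dfs1(1, 0)
--
--     total_dist = [0] * (n + 1)
--     total_dist[1] = subtree_dist[1]
--
--
--     def dfs2(curr, parent):
--         for nxt, weight in adj[curr]:
--             if nxt != parent:
--                 total_dist[nxt] = total_dist[curr] - subtree_size[nxt] * weight + (n - subtree_size[nxt]) * weight
--                 dfs2(nxt, curr)
--
--     dfs2(1, 0)
--
--     min_dist = float('inf')
--     best_node = -1
--
--     for i in range(1, n + 1):
--         if total_dist[i] < min_dist: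
--             min_dist = total_dist[i]
--             best_node = i
--
--     return best_node, min_dist
-- ===== SOURCE B (Python) =====
-- def get_min_dist_node(n, edges):
--     # Iterative re-implementation: both DFS passes are explicit-stack loops
--     # (no recursion), then an argmin scan seeded with node 1.
--     if n == 1:
--         return 1, 0
--
--     adj = [[] for _ in range(n + 1)]
--     for u, v, w in edges:
--         adj[u].append((v, w))
--         adj[v].append((u, w))
--
--     size = [0] * (n + 1)
--     dist = [0] * (n + 1)
--
--     # pass 1: post-order via a stack of frames [node, parent, next-child-index, weight-to-parent]
--     size[1] = 1
--     stack = [[1, 0, 0, 0]]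
--     while stack:
--         frame = stack[-1]
--         curr, parent, i, w = frame
--         if i < len(adj[curr]):
--             frame[2] += 1
--             nxt, wt = adj[curr][i]
--             if nxt != parent:
--                 size[nxt] = 1
--                 stack.append([nxt, curr, 0, wt])
--         else:
--             stack.pop()
--             if stack:
--                 size[parent] += size[curr]
--                 dist[parent] += dist[curr] + size[curr] * w
--
--     # pass 2: re-rooting, same traversal order,write total[child] before descending
--     total = [0] * (n + 1)
--     total[1] = dist[1]
--     stack = [[1, 0, 0]]
--     while stack:
--         frame = stack[-1]
--         curr, parent, i = frame
--         if i < len(adj[curr]):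
--             frame[2] += 1
--             nxt, w = adj[curr][i]
--             if nxt != parent:
--                 total[nxt] = total[curr] - size[nxt] * w + (n - size[nxt]) * w
--                 stack.append([nxt, curr, 0])
--         else:
--             stack.pop()
--
--     best = 1
--     for i in range(2, n + 1):
--         if total[i] < total[best]:
--             best = i
--     return best, total[best]
-- ===== Notes on version B (the rewrite author's own statement) =====
-- stated objective: alternative
-- what changed: Both recursive DFS passes (subtree size/distance accumulation and re-rooting) are replaced by explicit-stack iterative traversals with frames carrying the next-child index, and the final argmin scan is seeded with node 1 instead of a float('inf') sentinel.
-- outside the precondition, e.g. on get_min_dist_node(2, [(-1, 1, 5)]): A returns (1, 5), B returns (1, 5); on get_min_dist_node(2, [(0, 2, 3)]): A returns (1, 0), B returns (1, 0); on get_min_dist_node(2, [(1, 2, 3), (1, 2, 4)]): A returns (1, 7), B returns (1, 7)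
import Mathlib
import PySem

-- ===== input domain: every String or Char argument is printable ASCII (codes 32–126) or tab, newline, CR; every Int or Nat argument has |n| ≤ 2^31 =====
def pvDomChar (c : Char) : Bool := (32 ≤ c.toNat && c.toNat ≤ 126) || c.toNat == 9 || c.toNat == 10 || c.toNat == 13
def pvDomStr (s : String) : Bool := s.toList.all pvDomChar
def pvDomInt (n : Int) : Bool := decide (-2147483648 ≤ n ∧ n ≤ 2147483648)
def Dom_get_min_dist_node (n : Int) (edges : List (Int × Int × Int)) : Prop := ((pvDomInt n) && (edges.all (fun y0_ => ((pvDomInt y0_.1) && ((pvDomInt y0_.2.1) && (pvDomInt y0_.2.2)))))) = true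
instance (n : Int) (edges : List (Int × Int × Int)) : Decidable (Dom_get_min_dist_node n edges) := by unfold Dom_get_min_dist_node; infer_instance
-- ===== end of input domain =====

-- B replaces A's two recursive DFS passes by explicit-stack iterative traversals (same
-- traversal order), and seeds the final argmin scan with node 1 instead of an infinity
-- sentinel; objective: alternative (iterative, no recursion-depth usage).

-- ===== PORT A =====

-- adjacency list building (identical loop in both Pythons)
def pvAdj (edges : List (Int × Int × Int)) : Int → List (Int × Int) :=
  edges.foldl
    (fun adj e =>
      let adj1 : Int → List (Int × Int) :=
        fun j => if j = e.1 then adj j ++ [(e.2.1, e.2.2)] else adj j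
      fun j => if j = e.2.1 then adj1 j ++ [(e.1, e.2.2)] else adj1 j)
    (fun _ => [])

-- the inner `for nxt, weight in adj[curr]` loop of dfs1, parametrised by the recursive call
def pv_loop1 (child : Int → Int → ((Int → Int) × (Int → Int)) → ((Int → Int) × (Int → Int)))
    (curr parent : Int) :
    List (Int × Int) → ((Int → Int) × (Int → Int)) → ((Int → Int) × (Int → Int))
  | [], st => st
  | (nxt, w) :: rem, st =>
    if nxt ≠ parent then
      let st' := child nxt curr st
      pv_loop1 child curr parent rem
        (fun j => if j = curr then st'.1 curr + st'.1 nxt else st'.1 j,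
         fun j => if j = curr then st'.2 curr + st'.2 nxt + st'.1 nxt * w else st'.2 j)
    else pv_loop1 child curr parent rem st

-- dfs1, depth-bounded by fuel (a totality guard; never exhausted on Pre_ inputs)
def pv_dfs1 (adj : Int → List (Int × Int)) :
    Nat → Int → Int → ((Int → Int) × (Int → Int)) → ((Int → Int) × (Int → Int))
  | 0, _, _, st => st
  | f + 1, curr, parent, st =>
    pv_loop1 (fun nx pa s => pv_dfs1 adj f nx pa s) curr parent (adj curr)
      (fun j => if j = curr then 1 else st.1 j, st.2)

-- the inner loop of dfs2 (total_dist update happens before the recursive call)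
def pv_loop2 (child : Int → Int → (Int → Int) → (Int → Int)) (n : Int) (size : Int → Int)
    (curr parent : Int) : List (Int × Int) → (Int → Int) → (Int → Int)
  | [], tot => tot
  | (nxt, w) :: rem, tot =>
    if nxt ≠ parent then
      pv_loop2 child n size curr parent rem
        (child nxt curr
          (fun j => if j = nxt then tot curr - size nxt * w + (n - size nxt) * w else tot j))
    else pv_loop2 child n size curr parent rem tot

def pv_dfs2 (adj : Int → List (Int × Int)) (n : Int) (size : Int → Int) :
    Nat → Int → Int → (Int → Int) → (Int → Int)
  | 0, _, _, tot => tot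
  | f + 1, curr, parent, tot =>
    pv_loop2 (fun nx pa t => pv_dfs2 adj n size f nx pa t) n size curr parent (adj curr) tot

def get_min_dist_node (n : Int) (edges : List (Int × Int × Int)) : Int × Int :=
  if n = 1 then (1, 0)
  else
    let adj := pvAdj edges
    let st := pv_dfs1 adj (n.toNat + 2) 1 0 (fun _ => 0, fun _ => 0)
    let tot := pv_dfs2 adj n st.1 (n.toNat + 2) 1 0 (fun j => if j = 1 then st.2 1 else 0)
    let scan := (PySem.List.pyRange 1 (n + 1) 1).foldl
      (fun (acc : Int × Option Int) i =>
        match acc.2 with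
        | none => (i, some (tot i))
        | some m => if tot i < m then (i, some (tot i)) else acc)
      (-1, none)
    match scan.2 with
    | some m => (scan.1, m)
    | none => (scan.1, 0)   -- unreachable: the range is nonempty whenever n ≥ 1

-- ===== PORT B =====

-- potential function used only to justify termination of the stack machines
def pvPhiList (f : Int → Nat) : List (Int × Int) → Nat
  | [] => 1
  | (nxt, _) :: rem => 1 + f nxt + pvPhiList f rem

def pvPhi (adj : Int → List (Int × Int)) : Nat → List (Int × Int) → Nat
  | 0, rem => pvPhiList (fun _ => 0) rem
  | h + 1, rem => pvPhiList (fun nxt => pvPhi adj h (adj nxt)) rem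

theorem pvPhi_nil (adj : Int → List (Int × Int)) (h : Nat) : pvPhi adj h [] = 1 := by
  cases h <;> rfl

theorem pvPhi_pos (adj : Int → List (Int × Int)) (h : Nat) (rem : List (Int × Int)) :
    0 < pvPhi adj h rem := by
  cases rem with
  | nil => rw [pvPhi_nil]; exact Nat.one_pos
  | cons a t => obtain ⟨x, y⟩ := a; cases h <;> (simp only [pvPhi, pvPhiList]; omega)

-- small sum-measure lemmas cited by the machines' decreasing_by (kept as plain applications
-- there so the compiled definitions stay small)
theorem pv_dec_pop {α : Type} (g : α → Nat) (fr : α) (rest : List α) (h1 : 0 < g fr) :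
    (rest.map g).sum < ((fr :: rest).map g).sum := by
  simp only [List.map_cons, List.sum_cons]; omega

theorem pv_dec_head {α : Type} (g : α → Nat) (fr fr' : α) (rest : List α)
    (h : g fr' < g fr) : ((fr' :: rest).map g).sum < ((fr :: rest).map g).sum := by
  simp only [List.map_cons, List.sum_cons]; omega

theorem pv_dec_head2 {α : Type} (g : α → Nat) (fr a b : α) (rest : List α)
    (h : g a + g b < g fr) : ((a :: b :: rest).map g).sum < ((fr :: rest).map g).sum := by
  simp only [List.map_cons, List.sum_cons]; omega

theorem pvPhi_lt_cons (adj : Int → List (Int × Int)) (h : Nat) (x : Int × Int)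
    (rem : List (Int × Int)) : pvPhi adj h rem < pvPhi adj h (x :: rem) := by
  cases h <;> cases x <;> (simp only [pvPhi, pvPhiList]; omega)

theorem pvPhi_push_lt (adj : Int → List (Int × Int)) (g : Nat) (nxt wt : Int)
    (rem : List (Int × Int)) :
    pvPhi adj g (adj nxt) + pvPhi adj (g + 1) rem < pvPhi adj (g + 1) ((nxt, wt) :: rem) := by
  simp only [pvPhi, pvPhiList]; omega

-- pass-1 stack machine; a frame is (curr, parent, remaining adjacency, weight to parent,
-- fuel for the children of this frame — a Lean-side totality guard).
-- pv_step1 is one iteration of Python B's while-loop; pv_mach1 runs it until the stack empties.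
def pv_step1 (adj : Int → List (Int × Int)) :
    List (Int × Int × List (Int × Int) × Int × Nat) × ((Int → Int) × (Int → Int)) →
    List (Int × Int × List (Int × Int) × Int × Nat) × ((Int → Int) × (Int → Int))
  | ([], st) => ([], st)
  | ((curr, parent, [], w, _) :: rest, st) =>
    (match rest with
     | [] => ([], st)
     | fr2 :: rest2 =>
       (fr2 :: rest2,
        (fun j => if j = parent then st.1 parent + st.1 curr else st.1 j,
         fun j => if j = parent then st.2 parent + st.2 curr + st.1 curr * w else st.2 j)))
  | ((curr, parent, (nxt, wt) :: rem, w, h) :: rest, st) =>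
    if nxt ≠ parent then
      match h with
      | 0 =>
        ((curr, parent, rem, w, 0) :: rest,
         (fun j => if j = curr then st.1 curr + st.1 nxt else st.1 j,
          fun j => if j = curr then st.2 curr + st.2 nxt + st.1 nxt * wt else st.2 j))
      | g + 1 =>
        ((nxt, curr, adj nxt, wt, g) :: (curr, parent, rem, w, g + 1) :: rest,
         (fun j => if j = nxt then 1 else st.1 j, st.2))
    else ((curr, parent, rem, w, h) :: rest, st)

theorem pv_step1_dec (adj : Int → List (Int × Int))
    (s : List (Int × Int × List (Int × Int) × Int × Nat) × ((Int → Int) × (Int → Int)))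
    (hs : s.1 ≠ []) :
    ((pv_step1 adj s).1.map (fun fr => pvPhi adj fr.2.2.2.2 fr.2.2.1)).sum
      < (s.1.map (fun fr => pvPhi adj fr.2.2.2.2 fr.2.2.1)).sum :=
  match s, hs with
  | ([], _), hs => absurd rfl hs
  | ((_, _, [], _, h) :: [], _), _ => pv_dec_pop _ _ _ (pvPhi_pos adj h [])
  | ((_, _, [], _, h) :: _ :: _, _), _ => pv_dec_pop _ _ _ (pvPhi_pos adj h [])
  | ((curr, parent, (nxt, wt) :: rem, w, 0) :: rest, st), _ =>
    if hp : nxt ≠ parent then by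
      have e :
        pv_step1 adj ((curr, parent, (nxt, wt) :: rem, w, 0) :: rest, st)
          = ((curr, parent, rem, w, 0) :: rest,
             (fun j => if j = curr then st.1 curr + st.1 nxt else st.1 j,
              fun j => if j = curr then st.2 curr + st.2 nxt + st.1 nxt * wt else st.2 j)) := if_pos hp
      rw [e]
      exact pv_dec_head _ _ _ _ (pvPhi_lt_cons adj 0 (nxt, wt) rem)
    else by
      have e :
        pv_step1 adj ((curr, parent, (nxt, wt) :: rem, w, 0) :: rest, st)
          = ((curr, parent, rem, w, 0) :: rest, st) := if_neg hp
      rw [e]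
      exact pv_dec_head _ _ _ _ (pvPhi_lt_cons adj 0 (nxt, wt) rem)
  | ((curr, parent, (nxt, wt) :: rem, w, g + 1) :: rest, st), _ =>
    if hp : nxt ≠ parent then by
      have e :
        pv_step1 adj ((curr, parent, (nxt, wt) :: rem, w, g + 1) :: rest, st)
          = ((nxt, curr, adj nxt, wt, g) :: (curr, parent, rem, w, g + 1) :: rest,
             (fun j => if j = nxt then 1 else st.1 j, st.2)) := if_pos hp
      rw [e]
      exact pv_dec_head2 _ _ _ _ _ (pvPhi_push_lt adj g nxt wt rem)
    else by
      have e :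
        pv_step1 adj ((curr, parent, (nxt, wt) :: rem, w, g + 1) :: rest, st)
          = ((curr, parent, rem, w, g + 1) :: rest, st) := if_neg hp
      rw [e]
      exact pv_dec_head _ _ _ _ (pvPhi_lt_cons adj (g + 1) (nxt, wt) rem)

def pv_mach1 (adj : Int → List (Int × Int)) :
    List (Int × Int × List (Int × Int) × Int × Nat) × ((Int → Int) × (Int → Int)) →
    ((Int → Int) × (Int → Int))
  | s => if hs : s.1 = [] then s.2 else pv_mach1 adj (pv_step1 adj s)
termination_by s => (s.1.map (fun fr => pvPhi adj fr.2.2.2.2 fr.2.2.1)).sum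
decreasing_by exact pv_step1_dec adj s hs

-- pass-2 stack machine; frame is (curr, parent, remaining adjacency, fuel guard)
def pv_step2 (adj : Int → List (Int × Int)) (n : Int) (size : Int → Int) :
    List (Int × Int × List (Int × Int) × Nat) × (Int → Int) →
    List (Int × Int × List (Int × Int) × Nat) × (Int → Int)
  | ([], tot) => ([], tot)
  | ((_, _, [], _) :: rest, tot) => (rest, tot)
  | ((curr, parent, (nxt, w) :: rem, h) :: rest, tot) =>
    if nxt ≠ parent then
      let tot' : Int → Int :=
        fun j => if j = nxt then tot curr - size nxt * w + (n - size nxt) * w else tot j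
      match h with
      | 0 => ((curr, parent, rem, 0) :: rest, tot')
      | g + 1 => ((nxt, curr, adj nxt, g) :: (curr, parent, rem, g + 1) :: rest, tot')
    else ((curr, parent, rem, h) :: rest, tot)

theorem pv_step2_dec (adj : Int → List (Int × Int)) (n : Int) (size : Int → Int)
    (s : List (Int × Int × List (Int × Int) × Nat) × (Int → Int)) (hs : s.1 ≠ []) :
    ((pv_step2 adj n size s).1.map (fun fr => pvPhi adj fr.2.2.2 fr.2.2.1)).sum
      < (s.1.map (fun fr => pvPhi adj fr.2.2.2 fr.2.2.1)).sum :=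
  match s, hs with
  | ([], _), hs => absurd rfl hs
  | ((_, _, [], h) :: rest, _), _ => pv_dec_pop _ _ _ (pvPhi_pos adj h [])
  | ((curr, parent, (nxt, w) :: rem, 0) :: rest, tot), _ =>
    if hp : nxt ≠ parent then by
      have e :
        pv_step2 adj n size ((curr, parent, (nxt, w) :: rem, 0) :: rest, tot)
          = ((curr, parent, rem, 0) :: rest,
             fun j => if j = nxt then tot curr - size nxt * w + (n - size nxt) * w else tot j) := if_pos hp
      rw [e]
      exact pv_dec_head _ _ _ _ (pvPhi_lt_cons adj 0 (nxt, w) rem)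
    else by
      have e :
        pv_step2 adj n size ((curr, parent, (nxt, w) :: rem, 0) :: rest, tot)
          = ((curr, parent, rem, 0) :: rest, tot) := if_neg hp
      rw [e]
      exact pv_dec_head _ _ _ _ (pvPhi_lt_cons adj 0 (nxt, w) rem)
  | ((curr, parent, (nxt, w) :: rem, g + 1) :: rest, tot), _ =>
    if hp : nxt ≠ parent then by
      have e :
        pv_step2 adj n size ((curr, parent, (nxt, w) :: rem, g + 1) :: rest, tot)
          = ((nxt, curr, adj nxt, g) :: (curr, parent, rem, g + 1) :: rest,
             fun j => if j = nxt then tot curr - size nxt * w + (n - size nxt) * w else tot j) := if_pos hp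
      rw [e]
      exact pv_dec_head2 _ _ _ _ _ (pvPhi_push_lt adj g nxt w rem)
    else by
      have e :
        pv_step2 adj n size ((curr, parent, (nxt, w) :: rem, g + 1) :: rest, tot)
          = ((curr, parent, rem, g + 1) :: rest, tot) := if_neg hp
      rw [e]
      exact pv_dec_head _ _ _ _ (pvPhi_lt_cons adj (g + 1) (nxt, w) rem)

def pv_mach2 (adj : Int → List (Int × Int)) (n : Int) (size : Int → Int) :
    List (Int × Int × List (Int × Int) × Nat) × (Int → Int) → (Int → Int)
  | s => if hs : s.1 = [] then s.2 else pv_mach2 adj n size (pv_step2 adj n size s)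
termination_by s => (s.1.map (fun fr => pvPhi adj fr.2.2.2 fr.2.2.1)).sum
decreasing_by exact pv_step2_dec adj n size s hs

def get_min_dist_node_alt (n : Int) (edges : List (Int × Int × Int)) : Int × Int :=
  if n = 1 then (1, 0)
  else
    let adj := pvAdj edges
    let st := pv_mach1 adj ([(1, 0, adj 1, 0, n.toNat + 1)],
      (fun j => if j = 1 then 1 else 0, fun _ => 0))
    let tot := pv_mach2 adj n st.1 ([(1, 0, adj 1, n.toNat + 1)],
      fun j => if j = 1 then st.2 1 else 0)
    let best := (PySem.List.pyRange 2 (n + 1) 1).foldl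
      (fun b i => if tot i < tot b then i else b) 1
    (best, tot best)

-- ===== PRECONDITION & SPEC =====

-- union-find-style acyclicity/simplicity test used only to state the precondition
def pvCompsMerge (comps : List (List Int)) (i j : Nat) : List (List Int) :=
  (comps.getD i [] ++ comps.getD j []) :: ((comps.eraseIdx (max i j)).eraseIdx (min i j))

def pvAcyclicGo : List (Int × Int) → List (List Int) → Bool
  | [], _ => true
  | (u, v) :: rest, comps =>
    if u = v then false
    else
      match comps.findIdx? (fun c => c.contains u), comps.findIdx? (fun c => c.contains v) with
      | some i, some j => if i = j then false else pvAcyclicGo rest (pvCompsMerge comps i j)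
      | some i, none => pvAcyclicGo rest (comps.set i (v :: comps.getD i []))
      | none, some j => pvAcyclicGo rest (comps.set j (u :: comps.getD j []))
      | none, none => pvAcyclicGo rest ([u, v] :: comps)

-- Pre_ is the task's natural domain: either n = 1 (A returns (1, 0) whatever the edges), or
-- node labels lie in 1..n and the undirected graph is simple and acyclic (a forest).
-- It excludes inputs on which A raises (cycles: unbounded recursion; labels > n: IndexError)
-- and some inputs on which A still returns: labels ≤ 0 (Python's negative-index wraparound,
-- which an Int-indexed port cannot reproduce), and parallel edges / self-loops on which A's
-- parent-skipping recursion happens to terminate — accidental behaviour B also reproduces.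
def Pre_get_min_dist_node (n : Int) (edges : List (Int × Int × Int)) : Prop :=
  n = 1 ∨
    (1 ≤ n ∧ (∀ e ∈ edges, 1 ≤ e.1 ∧ e.1 ≤ n ∧ 1 ≤ e.2.1 ∧ e.2.1 ≤ n) ∧
      pvAcyclicGo (edges.map (fun e => (e.1, e.2.1))) [] = true)

instance (n : Int) (edges : List (Int × Int × Int)) : Decidable (Pre_get_min_dist_node n edges) := by
  unfold Pre_get_min_dist_node; infer_instance

def pvWitness_get_min_dist_node : Int × (List (Int × Int × Int)) :=
  (3, [(1, 2, 5), (2, 3, 1)])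

def Spec_get_min_dist_node (n : Int) (edges : List (Int × Int × Int)) (out : Int × Int) : Prop := out = get_min_dist_node_alt n edges
instance (n : Int) (edges : List (Int × Int × Int)) (out : Int × Int) : Decidable (Spec_get_min_dist_node n edges out) := by unfold Spec_get_min_dist_node; infer_instance

-- ===== CLAIM (what is proved, stated in full; the proofs are below) =====
def Claim_equal_get_min_dist_node : Prop := ∀ (n : Int) (edges : List (Int × Int × Int)), Dom_get_min_dist_node n edges → Pre_get_min_dist_node n edges → Spec_get_min_dist_node n edges (get_min_dist_node n edges)

-- ===== LEMMAS AND PROOFS =====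

-- single-step equations of the machines (one while-loop iteration each, named)
theorem mach1_nil (adj : Int → List (Int × Int)) (st : (Int → Int) × (Int → Int)) :
    pv_mach1 adj ([], st) = st := by
  rw [pv_mach1]; rfl

theorem mach1_step (adj : Int → List (Int × Int))
    (fr : Int × Int × List (Int × Int) × Int × Nat)
    (rest : List (Int × Int × List (Int × Int) × Int × Nat))
    (st : (Int → Int) × (Int → Int)) :
    pv_mach1 adj (fr :: rest, st) = pv_mach1 adj (pv_step1 adj (fr :: rest, st)) := by
  conv_lhs => rw [pv_mach1]
  exact dif_neg (by simp)

theorem mach1_done (adj : Int → List (Int × Int)) (c p w : Int) (h : Nat)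
    (st : (Int → Int) × (Int → Int)) :
    pv_mach1 adj ([(c, p, [], w, h)], st) = st := by
  rw [mach1_step]
  simp only [pv_step1]
  exact mach1_nil adj st

theorem mach1_pop (adj : Int → List (Int × Int)) (c p w : Int) (h : Nat)
    (fr2 : Int × Int × List (Int × Int) × Int × Nat)
    (rest2 : List (Int × Int × List (Int × Int) × Int × Nat))
    (st : (Int → Int) × (Int → Int)) :
    pv_mach1 adj ((c, p, [], w, h) :: fr2 :: rest2, st)
      = pv_mach1 adj (fr2 :: rest2,
          (fun j => if j = p then st.1 p + st.1 c else st.1 j,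
           fun j => if j = p then st.2 p + st.2 c + st.1 c * w else st.2 j)) := by
  rw [mach1_step]; rfl

theorem mach1_skip (adj : Int → List (Int × Int)) (c p nxt wt w : Int) (h : Nat)
    (rem : List (Int × Int)) (rest : List (Int × Int × List (Int × Int) × Int × Nat))
    (st : (Int → Int) × (Int → Int)) (hp : nxt = p) :
    pv_mach1 adj ((c, p, (nxt, wt) :: rem, w, h) :: rest, st)
      = pv_mach1 adj ((c, p, rem, w, h) :: rest, st) := by
  rw [mach1_step]; simp [pv_step1, hp]

theorem mach1_zero (adj : Int → List (Int × Int)) (c p nxt wt w : Int)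
    (rem : List (Int × Int)) (rest : List (Int × Int × List (Int × Int) × Int × Nat))
    (st : (Int → Int) × (Int → Int)) (hp : nxt ≠ p) :
    pv_mach1 adj ((c, p, (nxt, wt) :: rem, w, 0) :: rest, st)
      = pv_mach1 adj ((c, p, rem, w, 0) :: rest,
          (fun j => if j = c then st.1 c + st.1 nxt else st.1 j,
           fun j => if j = c then st.2 c + st.2 nxt + st.1 nxt * wt else st.2 j)) := by
  rw [mach1_step]; simp [pv_step1, hp]

theorem mach1_push (adj : Int → List (Int × Int)) (c p nxt wt w : Int) (g : Nat)
    (rem : List (Int × Int)) (rest : List (Int × Int × List (Int × Int) × Int × Nat))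
    (st : (Int → Int) × (Int → Int)) (hp : nxt ≠ p) :
    pv_mach1 adj ((c, p, (nxt, wt) :: rem, w, g + 1) :: rest, st)
      = pv_mach1 adj ((nxt, c, adj nxt, wt, g) :: (c, p, rem, w, g + 1) :: rest,
          (fun j => if j = nxt then 1 else st.1 j, st.2)) := by
  rw [mach1_step]; simp [pv_step1, hp]

theorem mach2_nil (adj : Int → List (Int × Int)) (n : Int) (size : Int → Int)
    (tot : Int → Int) : pv_mach2 adj n size ([], tot) = tot := by
  rw [pv_mach2]; rfl

theorem mach2_step (adj : Int → List (Int × Int)) (n : Int) (size : Int → Int)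
    (fr : Int × Int × List (Int × Int) × Nat)
    (rest : List (Int × Int × List (Int × Int) × Nat)) (tot : Int → Int) :
    pv_mach2 adj n size (fr :: rest, tot)
      = pv_mach2 adj n size (pv_step2 adj n size (fr :: rest, tot)) := by
  conv_lhs => rw [pv_mach2]
  exact dif_neg (by simp)

theorem mach2_pop (adj : Int → List (Int × Int)) (n : Int) (size : Int → Int)
    (c p : Int) (h : Nat) (rest : List (Int × Int × List (Int × Int) × Nat))
    (tot : Int → Int) :
    pv_mach2 adj n size ((c, p, [], h) :: rest, tot) = pv_mach2 adj n size (rest, tot) := by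
  rw [mach2_step]; rfl

theorem mach2_skip (adj : Int → List (Int × Int)) (n : Int) (size : Int → Int)
    (c p nxt w : Int) (h : Nat) (rem : List (Int × Int))
    (rest : List (Int × Int × List (Int × Int) × Nat)) (tot : Int → Int) (hp : nxt = p) :
    pv_mach2 adj n size ((c, p, (nxt, w) :: rem, h) :: rest, tot)
      = pv_mach2 adj n size ((c, p, rem, h) :: rest, tot) := by
  rw [mach2_step]; simp [pv_step2, hp]

theorem mach2_zero (adj : Int → List (Int × Int)) (n : Int) (size : Int → Int)
    (c p nxt w : Int) (rem : List (Int × Int))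
    (rest : List (Int × Int × List (Int × Int) × Nat)) (tot : Int → Int) (hp : nxt ≠ p) :
    pv_mach2 adj n size ((c, p, (nxt, w) :: rem, 0) :: rest, tot)
      = pv_mach2 adj n size ((c, p, rem, 0) :: rest,
          fun j => if j = nxt then tot c - size nxt * w + (n - size nxt) * w else tot j) := by
  rw [mach2_step]; simp [pv_step2, hp]

theorem mach2_push (adj : Int → List (Int × Int)) (n : Int) (size : Int → Int)
    (c p nxt w : Int) (g : Nat) (rem : List (Int × Int))
    (rest : List (Int × Int × List (Int × Int) × Nat)) (tot : Int → Int) (hp : nxt ≠ p) :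
    pv_mach2 adj n size ((c, p, (nxt, w) :: rem, g + 1) :: rest, tot)
      = pv_mach2 adj n size ((nxt, c, adj nxt, g) :: (c, p, rem, g + 1) :: rest,
          fun j => if j = nxt then tot c - size nxt * w + (n - size nxt) * w else tot j) := by
  rw [mach2_step]; simp [pv_step2, hp]

-- the pass-1 machine runs a frame's remaining children exactly as dfs1's inner loop does
theorem pv_sim1 (adj : Int → List (Int × Int)) :
    ∀ (h : Nat) (rem : List (Int × Int)) (curr parent w : Int)
      (rest : List (Int × Int × List (Int × Int) × Int × Nat))
      (st : (Int → Int) × (Int → Int)),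
      pv_mach1 adj ((curr, parent, rem, w, h) :: rest, st)
        = pv_mach1 adj ((curr, parent, [], w, h) :: rest,
            pv_loop1 (fun nx pa s => pv_dfs1 adj h nx pa s) curr parent rem st) := by
  intro h
  induction h with
  | zero =>
    intro rem curr parent w rest
    induction rem with
    | nil => intro st; simp [pv_loop1]
    | cons hd tl ih =>
      intro st
      obtain ⟨nxt, wt⟩ := hd
      by_cases hp : nxt = parent
      · rw [mach1_skip adj curr parent nxt wt w 0 tl rest st hp, ih]
        simp [pv_loop1, hp]
      · rw [mach1_zero adj curr parent nxt wt w tl rest st hp, ih]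
        simp only [pv_loop1, hp, ne_eq, not_false_eq_true, if_true, ite_true]
        rfl
  | succ g ihg =>
    intro rem curr parent w rest
    induction rem with
    | nil => intro st; simp [pv_loop1]
    | cons hd tl ih =>
      intro st
      obtain ⟨nxt, wt⟩ := hd
      by_cases hp : nxt = parent
      · rw [mach1_skip adj curr parent nxt wt w (g + 1) tl rest st hp, ih]
        simp [pv_loop1, hp]
      · rw [mach1_push adj curr parent nxt wt w g tl rest st hp,
            ihg (adj nxt) nxt curr wt ((curr, parent, tl, w, g + 1) :: rest)
              (fun j => if j = nxt then 1 else st.1 j, st.2),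
            mach1_pop, ih]
        simp only [pv_loop1, hp, ne_eq, not_false_eq_true, if_true, ite_true]
        rfl

theorem pv_sim2 (adj : Int → List (Int × Int)) (n : Int) (size : Int → Int) :
    ∀ (h : Nat) (rem : List (Int × Int)) (curr parent : Int)
      (rest : List (Int × Int × List (Int × Int) × Nat)) (tot : Int → Int),
      pv_mach2 adj n size ((curr, parent, rem, h) :: rest, tot)
        = pv_mach2 adj n size (rest,
            pv_loop2 (fun nx pa t => pv_dfs2 adj n size h nx pa t) n size curr parent rem tot) := by
  intro h
  induction h with
  | zero =>
    intro rem curr parent rest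
    induction rem with
    | nil => intro tot; simp [pv_loop2, mach2_pop]
    | cons hd tl ih =>
      intro tot
      obtain ⟨nxt, w⟩ := hd
      by_cases hp : nxt = parent
      · rw [mach2_skip adj n size curr parent nxt w 0 tl rest tot hp, ih]
        simp [pv_loop2, hp]
      · rw [mach2_zero adj n size curr parent nxt w tl rest tot hp, ih]
        simp only [pv_loop2, hp, ne_eq, not_false_eq_true, if_true, ite_true]
        rfl
  | succ g ihg =>
    intro rem curr parent rest
    induction rem with
    | nil => intro tot; simp [pv_loop2, mach2_pop]
    | cons hd tl ih =>
      intro tot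
      obtain ⟨nxt, w⟩ := hd
      by_cases hp : nxt = parent
      · rw [mach2_skip adj n size curr parent nxt w (g + 1) tl rest tot hp, ih]
        simp [pv_loop2, hp]
      · rw [mach2_push adj n size curr parent nxt w g tl rest tot hp,
            ihg (adj nxt) nxt curr ((curr, parent, tl, g + 1) :: rest), ih]
        simp only [pv_loop2, hp, ne_eq, not_false_eq_true, if_true, ite_true]
        rfl

-- A's sentinel-seeded argmin fold equals B's node-1-seeded argmin fold
theorem pv_scan (tot : Int → Int) :
    ∀ (l : List Int) (b : Int),
      l.foldl
        (fun (acc : Int × Option Int) i =>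
          match acc.2 with
          | none => (i, some (tot i))
          | some m => if tot i < m then (i, some (tot i)) else acc)
        (b, some (tot b))
      = ((l.foldl (fun bb i => if tot i < tot bb then i else bb) b),
          some (tot (l.foldl (fun bb i => if tot i < tot bb then i else bb) b))) := by
  intro l
  induction l with
  | nil => intro b; rfl
  | cons x t ih =>
    intro b
    simp only [List.foldl_cons]
    by_cases hx : tot x < tot b
    · simp only [hx, if_pos hx]; exact ih x
    · simp only [hx, if_neg hx]; exact ih b

-- ===== VERDICT (by name: the statement is the Claim_ definition above) =====
theorem get_min_dist_node_spec : Claim_equal_get_min_dist_node := by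
  intro n edges _ hpre
  unfold Spec_get_min_dist_node
  by_cases h1 : n = 1
  · simp [get_min_dist_node, get_min_dist_node_alt, h1]
  · have hn1 : 1 ≤ n := by
      rcases hpre with h | h
      · exact absurd h h1
      · exact h.1
    have hlt : (1 : Int) < n + 1 := by omega
    -- pass 1: the stack machine computes dfs1's final arrays
    have hst : ∀ st0 : (Int → Int) × (Int → Int),
        pv_mach1 (pvAdj edges) ([(1, 0, pvAdj edges 1, 0, n.toNat + 1)],
            (fun j => if j = 1 then 1 else st0.1 j, st0.2))
          = pv_dfs1 (pvAdj edges) (n.toNat + 2) 1 0 st0 := by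
      intro st0
      rw [pv_sim1, mach1_done]
      rfl
    -- pass 2: the second machine computes dfs2's final array
    have htot : ∀ (size tot0 : Int → Int),
        pv_mach2 (pvAdj edges) n size ([(1, 0, pvAdj edges 1, n.toNat + 1)], tot0)
          = pv_dfs2 (pvAdj edges) n size (n.toNat + 2) 1 0 tot0 := by
      intro size tot0
      rw [pv_sim2, mach2_nil]
      rfl
    simp only [get_min_dist_node, get_min_dist_node_alt, if_neg h1]
    rw [hst (fun _ => 0, fun _ => 0), htot]
    rw [PySem.List.pyRange_one_cons hlt]
    rw [show (1 : Int) + 1 = 2 by norm_num]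
    rw [List.foldl_cons]
    rw [pv_scan]
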